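-- pv_equiv track=rewrite | github.com/cmarti/orthogonal_pairs | scripts/utils.py | format_pos
-- ===== SOURCE A (Python) =====
-- from _collections import defaultdict
--
-- def format_pos(pos_labels):
--     molecule_pos = defaultdict(list)
--     for label in pos_labels:
--         molecule, pos = label.split(':')
--         molecule_pos[molecule].append(pos)
--     molecule_pos = sorted(['{}:{}'.format(k, '-'.join(v))
--                            for k, v in molecule_pos.items()
--                            if len(v) > 0])
--     return('/'.join(molecule_pos))
-- ===== SOURCE B (Python) =====
-- def format_pos(pos_labels):
--     # Per-molecule scan over split labels: dedup the molecule prefixes in first-appearance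
--     # order, then collect each molecule's positions by filtering; sort the formatted strings.
--     pairs = [label.split(':') for label in pos_labels]
--     molecules = list(dict.fromkeys(parts[0] for parts in pairs))
--     formatted = sorted(
--         '{}:{}'.format(mol, '-'.join(parts[1] for parts in pairs if parts[0] == mol))
--         for mol in molecules)
--     return '/'.join(formatted)
-- ===== Notes on version B (the rewrite author's own statement) =====
-- stated objective: alternative
-- what changed: Replaces A's single-pass defaultdict(list) grouping with an ordered dedup of the molecule prefixes followed by a per-molecule filter pass over the pre-split labels; the formatted strings are then sorted and joined as in A.
import Mathlib
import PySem

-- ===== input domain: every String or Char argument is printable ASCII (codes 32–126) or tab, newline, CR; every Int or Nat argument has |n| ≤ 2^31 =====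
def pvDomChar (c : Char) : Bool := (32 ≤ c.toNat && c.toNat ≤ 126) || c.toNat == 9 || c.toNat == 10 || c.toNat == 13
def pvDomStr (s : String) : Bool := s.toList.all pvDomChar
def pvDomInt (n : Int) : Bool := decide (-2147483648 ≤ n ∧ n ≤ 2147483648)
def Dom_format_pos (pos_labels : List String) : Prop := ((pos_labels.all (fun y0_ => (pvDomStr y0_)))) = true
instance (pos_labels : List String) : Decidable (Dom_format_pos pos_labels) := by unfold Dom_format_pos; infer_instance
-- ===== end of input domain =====

-- B replaces A's defaultdict-of-lists grouping by an ordered dedup of the molecule prefixes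
-- followed by a per-molecule filter pass over the split labels (alternative decomposition, not faster).

-- shared helpers: the two components of label.split(':') (exact under Pre_, where the split has 2 parts)
def pvSplit (l : String) : List String := (PySem.Str.split? l ":").getD []
def pvKey (l : String) : String := (pvSplit l).getD 0 ""
def pvSnd (l : String) : String := (pvSplit l).getD 1 ""

-- ===== PORT A =====
def format_pos (pos_labels : List String) : String :=
  let molecule_pos : PySem.Dict String (List String) :=
    pos_labels.foldl (fun d label => d.modify (pvKey label) [] (fun v => v ++ [pvSnd label]))
      PySem.Dict.empty
  let strs :=
    ((molecule_pos.items.filter (fun kv => decide (0 < PySem.List.len kv.2))).map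
      (fun kv => kv.1 ++ ":" ++ PySem.Str.join "-" kv.2))
  PySem.Str.join "/" (PySem.List.sorted strs (fun x => x) false)

-- ===== PORT B =====
def format_pos_alt (pos_labels : List String) : String :=
  let pairs := pos_labels.map pvSplit
  let molecules := PySem.List.dedup (pairs.map (fun p => p.getD 0 ""))
  let formatted := molecules.map (fun m =>
    m ++ ":" ++ PySem.Str.join "-" (((pairs.filter (fun p => p.getD 0 "" == m)).map (fun p => p.getD 1 ""))))
  PySem.Str.join "/" (PySem.List.sorted formatted (fun x => x) false)

-- ===== PRECONDITION & SPEC =====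
-- Pre_ excludes labels without exactly one ':', on which Python A raises ValueError (unpacking split(':')).
def Pre_format_pos (pos_labels : List String) : Prop :=
  ∀ l ∈ pos_labels, PySem.Str.count l ":" = 1
instance (pos_labels : List String) : Decidable (Pre_format_pos pos_labels) := by
  unfold Pre_format_pos; infer_instance
def pvWitness_format_pos : List String := (["b:2", "a:1", "a:3"])
def Spec_format_pos (pos_labels : List String) (out : String) : Prop := out = format_pos_alt pos_labels
instance (pos_labels : List String) (out : String) : Decidable (Spec_format_pos pos_labels out) := by
  unfold Spec_format_pos; infer_instance

-- ===== CLAIM (what is proved, stated in full; the proofs are below) =====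
def Claim_equal_format_pos : Prop := ∀ (pos_labels : List String), Dom_format_pos pos_labels → Pre_format_pos pos_labels → Spec_format_pos pos_labels (format_pos pos_labels)

-- ===== LEMMAS AND PROOFS =====

-- A's dict loop over labels is the canonical pair-fold over (key, value) pairs
lemma fold_pairs (xs : List String) :
    xs.foldl (fun (d : PySem.Dict String (List String)) label =>
        d.modify (pvKey label) [] (fun v => v ++ [pvSnd label])) PySem.Dict.empty
      = (xs.map (fun l => (pvKey l, pvSnd l))).foldl
          (fun d p => d.modify p.1 [] (fun v => v ++ [p.2])) PySem.Dict.empty := by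
  rw [List.foldl_map]

-- each grouped value list is the filtered positions of its molecule
lemma vals_eq (xs : List String) (k : String) :
    ((xs.map (fun l => (pvKey l, pvSnd l))).filter (fun p => p.1 == k)).map (fun p => p.2)
      = ((xs.map pvSplit).filter (fun p => p.getD 0 "" == k)).map (fun p => p.getD 1 "") := by
  simp [List.filter_map, List.map_map, Function.comp_def, pvKey, pvSnd]

-- the grouped list of a molecule that occurs is non-empty
lemma vals_ne_nil (xs : List String) (k : String) (h : k ∈ xs.map pvKey) :
    ((xs.map (fun l => (pvKey l, pvSnd l))).filter (fun p => p.1 == k)).map (fun p => p.2) ≠ [] := by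
  obtain ⟨l, hl, rfl⟩ := List.mem_map.mp h
  simp only [ne_eq, List.map_eq_nil_iff, List.filter_eq_nil_iff, not_forall]
  exact ⟨(pvKey l, pvSnd l), List.mem_map_of_mem hl, by simp⟩

lemma ab_eq (xs : List String) : format_pos xs = format_pos_alt xs := by
  unfold format_pos format_pos_alt
  dsimp only
  have hnd : (xs.foldl (fun (d : PySem.Dict String (List String)) label =>
        d.modify (pvKey label) [] (fun v => v ++ [pvSnd label])) PySem.Dict.empty).keys.Nodup :=
    PySem.Dict.nodup_keys_foldl_modify_key xs pvKey [] _ _ (by simp [PySem.Dict.keys_empty])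
  rw [PySem.Dict.items_eq_map_keys _ hnd []]
  rw [PySem.Dict.keys_foldl_modify_key xs pvKey [] (fun _ p => (fun v => v ++ [pvSnd p])),
      PySem.Dict.keys_empty, PySem.Set.update_nil_left]
  simp only [fold_pairs, PySem.Dict.getD_foldl_modify_append, PySem.Dict.getD_empty,
    List.nil_append]
  rw [List.filter_eq_self.mpr ?_]
  · simp only [List.map_map, Function.comp_def, PySem.List.dedup_eq_ofList]
    rw [show (fun x => (pvSplit x).getD 0 "") = pvKey from rfl]
    refine congrArg _ (congrArg (fun l => PySem.List.sorted l (fun x => x) false) ?_)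
    exact List.map_congr_left (fun k _ =>
      congrArg (fun v => k ++ ":" ++ PySem.Str.join "-" v) (vals_eq xs k))
  · intro kv hkv
    obtain ⟨k, hk, rfl⟩ := List.mem_map.mp hkv
    have hne := vals_ne_nil xs k ((PySem.Set.mem_ofList _ _).mp hk)
    simp only [PySem.List.len_eq, decide_eq_true_eq]
    exact_mod_cast List.length_pos_iff.mpr hne

-- ===== VERDICT (by name: the statement is the Claim_ definition above) =====
theorem format_pos_spec : Claim_equal_format_pos := by
  intro xs _ _
  unfold Spec_format_pos
  exact ab_eq xs
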